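-- pv_equiv track=rewrite | github.com/ad25343/InformaticaConversion | app/backend/agents/s2t_agent.py | _find_expr_for_port
-- ===== SOURCE A (Python) =====
-- def _find_expr_for_port(trans: dict, port: str) -> str:
--     """Return the expression text for a named port, or empty string if not found.
--
--     Handles Router group-qualified names (e.g., FLAGGED_FRAUD_SCORE → FRAUD_SCORE)
--     by also trying the port name with the group prefix stripped.
--     """
--     for expr in trans.get("expressions", []):
--         if expr["port"] == port:
--             return expr["expression"]
--     # Router group-qualified names: strip prefix and retry
--     # e.g., FLAGGED_FRAUD_SCORE → try FRAUD_SCORE, CLEARED_TRANSACTION_ID → TRANSACTION_ID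
--     if "_" in port:
--         # Try progressively stripping prefixes (handle multi-word group names)
--         parts = port.split("_")
--         for i in range(1, len(parts)):
--             stripped = "_".join(parts[i:])
--             for expr in trans.get("expressions", []):
--                 if expr["port"] == stripped:
--                     return expr["expression"]
--     return ""
-- ===== SOURCE B (Python) =====
-- def _find_expr_for_port(trans: dict, port: str) -> str:
--     """Single pass over the expressions, keeping the match with the best
--     (lowest) candidate rank, instead of re-scanning the list per candidate."""
--     candidates = [port]
--     if "_" in port:
--         parts = port.split("_")
--         candidates += ["_".join(parts[i:]) for i in range(1, len(parts))]
--     best = None  # (rank, expression) with the smallest rank seen so far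
--     for expr in trans.get("expressions", []):
--         name = expr["port"]
--         if name in candidates:
--             r = candidates.index(name)
--             if best is None or r < best[0]:
--                 best = (r, expr["expression"])
--     return best[1] if best is not None else ""
-- ===== Notes on version B (the rewrite author's own statement) =====
-- stated objective: alternative
-- what changed: A searches candidate names in priority order, rescanning the expression list once per candidate; B makes ONE pass over the expression list, ranking each expression's port against the candidate list and keeping the match with the lowest rank (first expression on rank ties).
import Mathlib
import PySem

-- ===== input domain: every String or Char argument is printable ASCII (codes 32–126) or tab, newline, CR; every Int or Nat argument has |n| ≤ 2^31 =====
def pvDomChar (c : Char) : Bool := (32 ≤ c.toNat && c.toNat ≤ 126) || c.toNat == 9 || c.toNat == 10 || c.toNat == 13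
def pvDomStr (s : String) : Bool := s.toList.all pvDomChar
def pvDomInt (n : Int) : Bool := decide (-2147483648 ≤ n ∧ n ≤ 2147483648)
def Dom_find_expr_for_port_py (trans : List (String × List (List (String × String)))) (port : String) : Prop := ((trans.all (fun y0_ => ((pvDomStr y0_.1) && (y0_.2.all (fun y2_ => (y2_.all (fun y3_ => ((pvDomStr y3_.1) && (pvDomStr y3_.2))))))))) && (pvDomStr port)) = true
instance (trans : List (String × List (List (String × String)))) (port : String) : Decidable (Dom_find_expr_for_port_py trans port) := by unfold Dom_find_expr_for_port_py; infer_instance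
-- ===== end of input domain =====

-- B replaces A's staged per-candidate rescans of the expression list by ONE pass over the
-- expressions keeping the match with the lowest candidate rank (objective: alternative, same cost).


-- ===== PORT A =====
-- the 'for expr in …: if expr["port"] == p: return expr["expression"]' loop
-- (exact inside Pre_, where every expression dict carries both keys)
def pvScanA (exprs : List (List (String × String))) (p : String) : Option String :=
  match exprs with
  | [] => none
  | e :: rest =>
    if (PySem.Dict.mk e).getD "port" "" == p then some ((PySem.Dict.mk e).getD "expression" "")
    else pvScanA rest p

def find_expr_for_port_py (trans : List (String × List (List (String × String)))) (port : String) : String :=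
  let exprs := (PySem.Dict.mk trans).getD "expressions" []
  match pvScanA exprs port with
  | some v => v
  | none =>
    if PySem.Str.isIn "_" port then
      let parts := ((PySem.Str.split? port "_").getD [])
      ((PySem.List.pyRange 1 parts.length 1).foldl
        (fun acc i =>
          match acc with
          | some v => some v
          | none => pvScanA exprs (PySem.Str.join "_" (PySem.List.slice parts (some i) none)))
        none).getD ""
    else ""

-- ===== PORT B =====
-- the ordered candidate-name list: the port itself, then each prefix-stripped form
def pvCandidates (port : String) : List String :=
  port ::
    (if PySem.Str.isIn "_" port then
      (PySem.List.pyRange 1 (((PySem.Str.split? port "_").getD [])).length 1).map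
        (fun i => PySem.Str.join "_" (PySem.List.slice (((PySem.Str.split? port "_").getD [])) (some i) none))
    else [])

-- the body of B's single loop: keep the (rank, expression) pair with the smallest rank seen
def pvStep (candidates : List String) (acc : Option (Nat × String)) (e : List (String × String)) : Option (Nat × String) :=
  match PySem.List.index? candidates ((PySem.Dict.mk e).getD "port" "") with
  | none => acc
  | some r =>
    match acc with
    | none => some (r, (PySem.Dict.mk e).getD "expression" "")
    | some (br, _) => if r < br then some (r, (PySem.Dict.mk e).getD "expression" "") else acc

def find_expr_for_port_py_alt (trans : List (String × List (List (String × String)))) (port : String) : String :=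
  let candidates := pvCandidates port
  match ((PySem.Dict.mk trans).getD "expressions" []).foldl (pvStep candidates) none with
  | some (_, v) => v
  | none => ""

-- ===== PRECONDITION & SPEC =====
-- Pre_ excludes inputs where some scanned expression dict lacks the "port" or "expression" key,
-- on which A raises KeyError; it is slightly narrower than that reason (it requires both keys of
-- every expression dict, even ones A never reaches before returning) — see claim.json cites.
def Pre_find_expr_for_port_py (trans : List (String × List (List (String × String)))) (port : String) : Prop :=
  ∀ e ∈ (PySem.Dict.mk trans).getD "expressions" [],
    "port" ∈ e.map Prod.fst ∧ "expression" ∈ e.map Prod.fst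
instance (trans : List (String × List (List (String × String)))) (port : String) : Decidable (Pre_find_expr_for_port_py trans port) := by unfold Pre_find_expr_for_port_py; infer_instance

def pvWitness_find_expr_for_port_py : (List (String × List (List (String × String)))) × String :=
  ([("expressions", [[("port", "SCORE"), ("expression", "a+b")]])], "FLAGGED_SCORE")

def Spec_find_expr_for_port_py (trans : List (String × List (List (String × String)))) (port : String) (out : String) : Prop := out = find_expr_for_port_py_alt trans port
instance (trans : List (String × List (List (String × String)))) (port : String) (out : String) : Decidable (Spec_find_expr_for_port_py trans port out) := by unfold Spec_find_expr_for_port_py; infer_instance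

-- ===== CLAIM (what is proved, stated in full; the proofs are below) =====
def Claim_equal_find_expr_for_port_py : Prop := ∀ (trans : List (String × List (List (String × String)))) (port : String), Dom_find_expr_for_port_py trans port → Pre_find_expr_for_port_py trans port → Spec_find_expr_for_port_py trans port (find_expr_for_port_py trans port)

-- ===== LEMMAS AND PROOFS =====
-- proof-side characterization of A: search candidates in order, first match wins
def pvSearch (exprs : List (List (String × String))) : List String → String
  | [] => ""
  | c :: cs =>
    match pvScanA exprs c with
    | some v => v
    | none => pvSearch exprs cs

-- a fold that has already found a value keeps it
lemma foldl_found (exprs : List (List (String × String))) (g : Int → String)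
    (L : List Int) (v : String) :
    L.foldl (fun acc i =>
      match acc with
      | some w => some w
      | none => pvScanA exprs (g i)) (some v) = some v := by
  induction L with
  | nil => rfl
  | cons i L ih => simpa using ih

-- A's fallback fold over the index list computes pvSearch over the mapped candidate names
lemma foldl_eq_search (exprs : List (List (String × String))) (g : Int → String)
    (L : List Int) :
    (L.foldl (fun acc i =>
      match acc with
      | some w => some w
      | none => pvScanA exprs (g i)) none).getD "" = pvSearch exprs (L.map g) := by
  induction L with
  | nil => rfl
  | cons i L ih =>
    simp only [List.foldl_cons, List.map_cons, pvSearch]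
    cases h : pvScanA exprs (g i) with
    | some v => rw [foldl_found]; simp
    | none => simp only []; simpa [h] using ih

-- A is pvSearch over the candidate list
lemma A_eq_search (trans : List (String × List (List (String × String)))) (port : String) :
    find_expr_for_port_py trans port
      = pvSearch ((PySem.Dict.mk trans).getD "expressions" []) (pvCandidates port) := by
  unfold find_expr_for_port_py pvCandidates
  simp only [pvSearch]
  cases h : pvScanA ((PySem.Dict.mk trans).getD "expressions" []) port with
  | some v => simp [h]
  | none =>
    simp only []
    by_cases hu : PySem.Str.isIn "_" port = true
    · rw [if_pos hu, if_pos hu, foldl_eq_search]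
    · rw [if_neg hu, if_neg hu]; rfl

-- abbreviation for the "port" value of an expression dict
def pvName (e : List (String × String)) : String := (PySem.Dict.mk e).getD "port" ""

lemma scanA_none_name (exprs : List (List (String × String))) (c : String)
    (h : pvScanA exprs c = none) : ∀ e ∈ exprs, pvName e ≠ c := by
  induction exprs with
  | nil => simp
  | cons e rest ih =>
    unfold pvScanA at h
    by_cases he : ((PySem.Dict.mk e).getD "port" "" == c) = true
    · simp [he] at h
    · intro x hx
      rcases List.mem_cons.mp hx with rfl | hx
      · simpa [pvName] using he
      · exact ih (by simpa [he] using h) x hx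

-- once rank 0 is reached the accumulator never changes
lemma fold_keep_zero (cs : List String) (exprs : List (List (String × String))) (v : String) :
    exprs.foldl (pvStep cs) (some (0, v)) = some (0, v) := by
  induction exprs with
  | nil => rfl
  | cons e rest ih =>
    simp only [List.foldl_cons]
    have : pvStep cs (some (0, v)) e = some (0, v) := by
      unfold pvStep
      cases PySem.List.index? cs ((PySem.Dict.mk e).getD "port" "") with
      | none => rfl
      | some r => simp
    rw [this, ih]

def pvLift : Option (Nat × String) → Option (Nat × String)
  | none => none
  | some (r, w) => some (r + 1, w)

-- if no expression's name equals the head candidate, the fold over (c :: cs) is the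
-- rank-shifted fold over cs
lemma fold_shift (c : String) (cs : List String) (exprs : List (List (String × String)))
    (hne : ∀ e ∈ exprs, pvName e ≠ c) (acc : Option (Nat × String)) :
    exprs.foldl (pvStep (c :: cs)) (pvLift acc) = pvLift (exprs.foldl (pvStep cs) acc) := by
  induction exprs generalizing acc with
  | nil => rfl
  | cons e rest ih =>
    have hc : c ≠ pvName e := fun h => (hne e (by simp)) h.symm
    have hidx : PySem.List.index? (c :: cs) (pvName e)
        = (PySem.List.index? cs (pvName e)).map (· + 1) :=
      PySem.List.index?_cons_of_ne cs hc
    have hstep : pvStep (c :: cs) (pvLift acc) e = pvLift (pvStep cs acc e) := by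
      unfold pvStep
      rw [show (PySem.Dict.mk e).getD "port" "" = pvName e from rfl, hidx]
      cases h : PySem.List.index? cs (pvName e) with
      | none => simp
      | some r =>
        cases acc with
        | none => simp [pvLift]
        | some p =>
          obtain ⟨br, w⟩ := p
          simp only [Option.map_some, pvLift]
          by_cases hlt : r < br
          · simp [hlt]
          · simp [hlt]
    simp only [List.foldl_cons, hstep, ih (fun x hx => hne x (List.mem_cons_of_mem _ hx)) (pvStep cs acc e)]

-- if some expression matches the head candidate c (first match value v), the fold over (c :: cs)
-- from any accumulator of strictly positive rank (or none) ends at some (0, v)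
lemma fold_hit (c : String) (cs : List String) (exprs : List (List (String × String)))
    (v : String) (h : pvScanA exprs c = some v) (acc : Option (Nat × String))
    (hacc : acc = none ∨ ∃ br w, acc = some (br, w) ∧ 1 ≤ br) :
    exprs.foldl (pvStep (c :: cs)) acc = some (0, v) := by
  induction exprs generalizing acc with
  | nil => simp [pvScanA] at h
  | cons e rest ih =>
    unfold pvScanA at h
    by_cases he : ((PySem.Dict.mk e).getD "port" "" == c) = true
    · -- e is the first match: step sets (0, v), then nothing changes
      have hname : pvName e = c := by simpa [pvName] using he
      have hidx : PySem.List.index? (c :: cs) (pvName e) = some 0 := by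
        rw [hname]; exact PySem.List.index?_cons_self c cs
      have hv : (PySem.Dict.mk e).getD "expression" "" = v := by simpa [he] using h
      have hstep : pvStep (c :: cs) acc e = some (0, v) := by
        unfold pvStep
        rw [show (PySem.Dict.mk e).getD "port" "" = pvName e from rfl, hidx]
        rcases hacc with rfl | ⟨br, w, rfl, hbr⟩
        · simp [hv]
        · have : 0 < br := hbr
          simp [this, hv]
      rw [List.foldl_cons, hstep, fold_keep_zero]
    · -- e does not match c: the accumulator keeps a positive rank (or stays none)
      have h' : pvScanA rest c = some v := by simpa [he] using h
      have hname : c ≠ pvName e := by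
        intro hc
        apply he
        unfold pvName at hc
        rw [hc]
        exact beq_self_eq_true _
      have hidx : PySem.List.index? (c :: cs) (pvName e)
          = (PySem.List.index? cs (pvName e)).map (· + 1) :=
        PySem.List.index?_cons_of_ne cs hname
      have hacc' : pvStep (c :: cs) acc e = none ∨
          ∃ br w, pvStep (c :: cs) acc e = some (br, w) ∧ 1 ≤ br := by
        unfold pvStep
        rw [show (PySem.Dict.mk e).getD "port" "" = pvName e from rfl, hidx]
        cases hr : PySem.List.index? cs (pvName e) with
        | none => simpa using hacc
        | some r =>
          rcases hacc with rfl | ⟨br, w, rfl, hbr⟩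
          · exact Or.inr ⟨r + 1, (PySem.Dict.mk e).getD "expression" "", by simp, by omega⟩
          · simp only [Option.map_some]
            by_cases hlt : r + 1 < br
            · exact Or.inr ⟨r + 1, (PySem.Dict.mk e).getD "expression" "", by simp [hlt], by omega⟩
            · exact Or.inr ⟨br, w, by simp [hlt], hbr⟩
      rw [List.foldl_cons]
      exact ih h' _ hacc'

-- B's single fold computes pvSearch over any candidate list
lemma fold_eq_search (exprs : List (List (String × String))) (cs : List String) :
    (match exprs.foldl (pvStep cs) none with
     | some (_, v) => v
     | none => "") = pvSearch exprs cs := by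
  induction cs generalizing exprs with
  | nil =>
    have : exprs.foldl (pvStep []) none = none := by
      induction exprs with
      | nil => rfl
      | cons e rest ih =>
        simp only [List.foldl_cons]
        have : pvStep [] none e = none := by
          unfold pvStep
          rw [PySem.List.index?_eq_idxOf?]
          rfl
        rw [this, ih]
    simp [this, pvSearch]
  | cons c cs ih =>
    simp only [pvSearch]
    cases h : pvScanA exprs c with
    | some v =>
      rw [fold_hit c cs exprs v h none (Or.inl rfl)]
    | none =>
      have hshift := fold_shift c cs exprs (scanA_none_name exprs c h) none
      simp only [pvLift] at hshift
      rw [hshift]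
      cases hf : exprs.foldl (pvStep cs) none with
      | none => simpa [pvLift, hf] using ih exprs
      | some p =>
        obtain ⟨r, w⟩ := p
        have := ih exprs
        simp only [hf] at this
        simpa [pvLift] using this

-- ===== VERDICT (by name: the statement is the Claim_ definition above) =====
theorem find_expr_for_port_py_spec : Claim_equal_find_expr_for_port_py := by
  intro trans port _ _
  unfold Spec_find_expr_for_port_py find_expr_for_port_py_alt
  rw [A_eq_search, ← fold_eq_search]
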